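-- pv_equiv track=rewrite | github.com/ykdy3951/Baekjoon | 22862.py | solution
-- ===== SOURCE A (Python) =====
-- def solution(l:list, n:int, k:int) -> int:
--     ans = 0
--     temp = 0
--     while temp < n and l[temp] % 2:
--         temp += 1
--
--     fidx, sidx = temp, temp
--     temp = 0
--     while fidx < n and sidx < n:
--         if l[sidx] % 2 == 0:
--             temp += 1
--             sidx += 1
--         else:
--             if k == 0:
--                 ans = max(ans, temp)
--                 temp -= (1 - l[fidx] % 2)
--                 k += (l[fidx] % 2)
--                 fidx += 1
--             else:
--                 k -= 1
--                 sidx += 1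
--     return max(ans, temp)
-- ===== SOURCE B (Python) =====
-- def solution(l: list, n: int, k: int) -> int:
--     # Closed-form scan over the array of odd positions (with sentinels) instead
--     # of a two-pointer sliding window over every element.
--     odds = [i for i in range(n) if l[i] % 2]
--     m = len(odds)
--     ext = [-1] + odds + [n]
--     best = 0
--     for i in range(m + 1):
--         j = min(i + k, m)
--         evens = (ext[j + 1] - ext[i] - 1) - (j - i)
--         if evens > best:
--             best = evens
--     return best
-- ===== Notes on version B (the rewrite author's own statement) =====
-- stated objective: alternative
-- what changed: Replaces the element-by-element two-pointer sliding window with a scan over the precomputed array of odd positions (with -1/n sentinels), computing each candidate window's even count by a closed-form index difference.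
-- outside the precondition, e.g. on solution([2, 4, 1], 3, -1): A returns 2, B returns 0; on solution([1, 2], 2, -2): A returns 1, B returns 4
import Mathlib
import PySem

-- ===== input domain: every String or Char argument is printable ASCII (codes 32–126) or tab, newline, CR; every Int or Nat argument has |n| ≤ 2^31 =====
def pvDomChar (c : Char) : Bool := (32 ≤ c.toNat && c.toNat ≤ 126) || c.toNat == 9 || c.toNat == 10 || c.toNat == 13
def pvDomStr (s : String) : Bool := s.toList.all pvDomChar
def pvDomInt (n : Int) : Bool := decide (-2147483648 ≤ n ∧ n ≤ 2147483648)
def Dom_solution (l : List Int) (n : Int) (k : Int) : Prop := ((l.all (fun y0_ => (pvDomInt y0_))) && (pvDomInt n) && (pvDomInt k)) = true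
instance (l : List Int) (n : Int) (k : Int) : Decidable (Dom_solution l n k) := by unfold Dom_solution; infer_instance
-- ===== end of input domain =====

-- B replaces A's element-by-element two-pointer sliding window by a scan over the
-- precomputed array of odd positions (with -1/n sentinels), computing each candidate
-- window's even count by a closed-form index difference (alternative algorithm, no speed claim).

-- ===== PORT A =====
-- while temp < n and l[temp] % 2: temp += 1
def skipA (l : List Int) (n : Int) (temp : Int) : Int :=
  if h : temp < n ∧ PySem.Int.mod (PySem.List.pyGetD l temp 0) 2 ≠ 0 then
    skipA l n (temp + 1)
  else temp
termination_by (n - temp).toNat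
decreasing_by omega

-- the main while loop of A
def loopA (l : List Int) (n : Int) (fidx sidx temp k ans : Int) : Int :=
  if h : fidx < n ∧ sidx < n then
    if PySem.Int.mod (PySem.List.pyGetD l sidx 0) 2 = 0 then
      loopA l n fidx (sidx + 1) (temp + 1) k ans
    else if k = 0 then
      loopA l n (fidx + 1) sidx
        (temp - (1 - PySem.Int.mod (PySem.List.pyGetD l fidx 0) 2))
        (k + PySem.Int.mod (PySem.List.pyGetD l fidx 0) 2)
        (max ans temp)
    else
      loopA l n fidx (sidx + 1) temp (k - 1) ans
  else max ans temp
termination_by ((n - fidx).toNat + (n - sidx).toNat)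
decreasing_by all_goals omega

def solution (l : List Int) (n : Int) (k : Int) : Int :=
  let t := skipA l n 0
  loopA l n t t 0 k 0

-- ===== PORT B =====
def solution_alt (l : List Int) (n : Int) (k : Int) : Int :=
  let odds := (PySem.List.pyRange 0 n 1).filter
      (fun i => PySem.Int.mod (PySem.List.pyGetD l i 0) 2 != 0)
  let m : Int := odds.length
  let ext := [(-1 : Int)] ++ odds ++ [n]
  (PySem.List.pyRange 0 (m + 1) 1).foldl
    (fun best i =>
      let j := min (i + k) m
      let evens := (PySem.List.pyGetD ext (j + 1) 0 - PySem.List.pyGetD ext i 0 - 1) - (j - i)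
      if best < evens then evens else best) 0

-- ===== PRECONDITION & SPEC =====
-- Pre_ restricts to the natural domain: n ≤ len(l) (for n > len(l) A raises IndexError)
-- and a nonnegative deletion budget k (negative k is outside the natural domain of a
-- count; A's `k == 0` test treats a negative budget as unlimited).
def Pre_solution (l : List Int) (n : Int) (k : Int) : Prop := n ≤ l.length ∧ 0 ≤ k
instance (l : List Int) (n : Int) (k : Int) : Decidable (Pre_solution l n k) := by
  unfold Pre_solution; infer_instance

def pvWitness_solution : List Int × Int × Int := ([2, 1, 4], 3, 1)

def Spec_solution (l : List Int) (n : Int) (k : Int) (out : Int) : Prop := out = solution_alt l n k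
instance (l : List Int) (n : Int) (k : Int) (out : Int) : Decidable (Spec_solution l n k out) := by
  unfold Spec_solution; infer_instance

-- ===== CLAIM (what is proved, stated in full; the proofs are below) =====
def Claim_equal_solution : Prop := ∀ (l : List Int) (n : Int) (k : Int), Dom_solution l n k → Pre_solution l n k → Spec_solution l n k (solution l n k)

-- ===== LEMMAS AND PROOFS =====

-- odd-parity of the element at (Nat) position i; matches both ports' `% 2` tests
def oddP (l : List Int) (i : Nat) : Bool := PySem.Int.mod (l.getD i 0) 2 != 0

-- number of odd (resp. even) positions in [a, b)
def cntO (l : List Int) (a b : Nat) : Nat := (List.range' a (b - a)).countP (fun i => oddP l i)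
def cntE (l : List Int) (a b : Nat) : Nat := (List.range' a (b - a)).countP (fun i => !oddP l i)

-- position of the (b+1)-th odd index ≥ s, or N when there are at most b of them
def reach (l : List Int) (N s b : Nat) : Nat :=
  if h : s < N then
    if oddP l s then (if b = 0 then s else reach l N (s + 1) (b - 1))
    else reach l N (s + 1) b
  else N
termination_by N - s
decreasing_by all_goals omega

-- first even position ≥ s, or N
def firstEven (l : List Int) (N s : Nat) : Nat :=
  if h : s < N then (if oddP l s then firstEven l N (s + 1) else s) else N
termination_by N - s
decreasing_by omega

def nthO (l : List Int) (N j : Nat) : Nat := reach l N 0 j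
def mO (l : List Int) (N : Nat) : Nat := cntO l 0 N
-- start of candidate window number c
def stO (l : List Int) (N c : Nat) : Nat := if c = 0 then 0 else nthO l N (c - 1) + 1
-- even count of candidate window number c (B's closed form, as a count)
def fI (l : List Int) (N K c : Nat) : Int :=
  (cntE l (stO l N c) (nthO l N (min (c + K) (mO l N))) : Int)
-- max of fI over c ∈ [c, m]
def segMax (l : List Int) (N K c : Nat) : Int :=
  ((List.range' c (mO l N + 1 - c)).map (fI l N K)).foldr max 0

-- basic counting lemmas
theorem countP_add_countP_not (p : Nat → Bool) (l : List Nat) :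
    l.countP p + l.countP (fun x => !p x) = l.length := by
  induction l with
  | nil => simp
  | cons x xs ih => by_cases h : p x <;> simp [List.countP_cons, h] <;> omega

theorem range'_split {a b c : Nat} (h1 : a ≤ b) (h2 : b ≤ c) :
    List.range' a (c - a) = List.range' a (b - a) ++ List.range' b (c - b) := by
  have h3 := List.range'_append (s := a) (m := b - a) (n := c - b) (step := 1)
  rw [Nat.one_mul] at h3
  have hb : a + (b - a) = b := by omega
  rw [hb] at h3
  have h4 : c - a = b - a + (c - b) := by omega
  rw [h4, ← h3]

theorem cntO_split (l : List Int) {a b c : Nat} (h1 : a ≤ b) (h2 : b ≤ c) :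
    cntO l a c = cntO l a b + cntO l b c := by
  unfold cntO
  rw [range'_split h1 h2, List.countP_append]

theorem cntE_split (l : List Int) {a b c : Nat} (h1 : a ≤ b) (h2 : b ≤ c) :
    cntE l a c = cntE l a b + cntE l b c := by
  unfold cntE
  rw [range'_split h1 h2, List.countP_append]

theorem cntO_single (l : List Int) (a : Nat) :
    cntO l a (a + 1) = if oddP l a then 1 else 0 := by
  unfold cntO
  have h : a + 1 - a = 1 := by omega
  rw [h]
  by_cases hp : oddP l a <;> simp [List.range'_succ, List.countP_cons, hp]

theorem cntE_single (l : List Int) (a : Nat) :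
    cntE l a (a + 1) = if oddP l a then 0 else 1 := by
  unfold cntE
  have h : a + 1 - a = 1 := by omega
  rw [h]
  by_cases hp : oddP l a <;> simp [List.range'_succ, List.countP_cons, hp]

theorem cnt_len (l : List Int) {a b : Nat} (h : a ≤ b) :
    cntO l a b + cntE l a b = b - a := by
  unfold cntO cntE
  rw [countP_add_countP_not (fun i => oddP l i) (List.range' a (b - a))]
  simp

theorem cntO_nil (l : List Int) {a b : Nat} (h : b ≤ a) : cntO l a b = 0 := by
  unfold cntO
  have h2 : b - a = 0 := by omega
  simp [h2]

theorem cntE_nil (l : List Int) {a b : Nat} (h : b ≤ a) : cntE l a b = 0 := by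
  unfold cntE
  have h2 : b - a = 0 := by omega
  simp [h2]

theorem cntO_zero_pointwise (l : List Int) {a b j : Nat} (h : cntO l a b = 0)
    (h1 : a ≤ j) (h2 : j < b) : oddP l j = false := by
  unfold cntO at h
  rw [List.countP_eq_zero] at h
  have hj : j ∈ List.range' a (b - a) := by
    rw [List.mem_range'_1]
    omega
  simpa using h j hj

theorem cntO_all (l : List Int) {a b : Nat} (h : ∀ j, a ≤ j → j < b → oddP l j = true) :
    cntO l a b = b - a := by
  unfold cntO
  conv_rhs => rw [show b - a = (List.range' a (b - a)).length by simp]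
  rw [List.countP_eq_length]
  intro x hx
  rw [List.mem_range'_1] at hx
  exact h x hx.1 (by omega)

theorem cntE_right_mono (l : List Int) {a b b' : Nat} (h1 : a ≤ b) (h2 : b ≤ b') :
    cntE l a b ≤ cntE l a b' := by
  rw [cntE_split l h1 h2]
  omega

theorem cntE_left_anti (l : List Int) {a a' b : Nat} (h : a ≤ a') :
    cntE l a' b ≤ cntE l a b := by
  rcases Nat.le_total b a' with hb | hb
  · rw [cntE_nil l hb]
    omega
  · rw [cntE_split l h hb]
    omega

-- reach lemmas
theorem reach_le (l : List Int) (N s b : Nat) : reach l N s b ≤ N := by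
  fun_induction reach l N s b <;> omega

theorem reach_eq_of_ge (l : List Int) {N s : Nat} (b : Nat) (h : N ≤ s) : reach l N s b = N := by
  rw [reach]; simp [Nat.not_lt.mpr h]

theorem le_reach (l : List Int) {N s : Nat} (b : Nat) (h : s ≤ N) : s ≤ reach l N s b := by
  revert h
  fun_induction reach l N s b <;> intro h <;> omega

theorem reach_mono_b (l : List Int) {N s b b' : Nat} (h : b ≤ b') :
    reach l N s b ≤ reach l N s b' := by
  revert h
  induction hn : N - s using Nat.strong_induction_on generalizing s b b' with
  | _ n ih =>
  intro h
  rw [reach]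
  conv_rhs => rw [reach]
  by_cases h1 : s < N
  · simp only [dif_pos h1]
    by_cases h2 : oddP l s
    · simp only [if_pos h2]
      by_cases h3 : b' = 0
      · have hb : b = 0 := by omega
        simp [hb, h3]
      · simp only [if_neg h3]
        by_cases h4 : b = 0
        · simp only [if_pos h4]
          have := le_reach l (N := N) (s := s + 1) (b' - 1) (by omega)
          omega
        · simp only [if_neg h4]
          exact ih (N - (s + 1)) (by omega) (by omega) (by omega)
    · simp only [if_neg h2]
      exact ih (N - (s + 1)) (by omega) (by omega) (by omega)
  · simp only [dif_neg h1]
    exact le_refl N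

theorem reach_cnt (l : List Int) {N s : Nat} (b : Nat) (h : s ≤ N) :
    cntO l s (reach l N s b) ≤ b := by
  revert h
  induction hn : N - s using Nat.strong_induction_on generalizing s b with
  | _ n ih =>
  intro h
  rw [reach]
  by_cases h1 : s < N
  · simp only [dif_pos h1]
    by_cases h2 : oddP l s
    · simp only [if_pos h2]
      by_cases h3 : b = 0
      · simp only [if_pos h3]
        rw [cntO_nil l (le_refl s)]
        omega
      · simp only [if_neg h3]
        have hr := le_reach l (N := N) (s := s + 1) (b - 1) (by omega)
        rw [cntO_split l (by omega : s ≤ s + 1) hr, cntO_single, if_pos h2]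
        have h5 : cntO l (s + 1) (reach l N (s + 1) (b - 1)) ≤ b - 1 :=
          ih (N - (s + 1)) (by omega) (b - 1) (by omega) (by omega)
        omega
    · simp only [if_neg h2]
      have hr := le_reach l (N := N) (s := s + 1) b (by omega)
      rw [cntO_split l (by omega : s ≤ s + 1) hr, cntO_single, if_neg h2]
      have h5 : cntO l (s + 1) (reach l N (s + 1) b) ≤ b :=
        ih (N - (s + 1)) (by omega) b (by omega) (by omega)
      omega
  · simp only [dif_neg h1]
    rw [cntO_nil l (by omega : N ≤ s)]
    omega

theorem reach_lt_spec (l : List Int) {N s b : Nat} (h : reach l N s b < N) :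
    oddP l (reach l N s b) = true ∧ cntO l s (reach l N s b) = b := by
  revert h
  induction hn : N - s using Nat.strong_induction_on generalizing s b with
  | _ n ih =>
  intro h
  rw [reach] at h ⊢
  by_cases h1 : s < N
  · simp only [dif_pos h1] at h ⊢
    by_cases h2 : oddP l s
    · simp only [if_pos h2] at h ⊢
      by_cases h3 : b = 0
      · simp only [if_pos h3] at h ⊢
        exact ⟨h2, by rw [cntO_nil l (le_refl s)]; omega⟩
      · simp only [if_neg h3] at h ⊢
        have h5 : oddP l (reach l N (s + 1) (b - 1)) = true ∧
            cntO l (s + 1) (reach l N (s + 1) (b - 1)) = b - 1 :=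
          ih (N - (s + 1)) (by omega) (by omega) h
        have hr := le_reach l (N := N) (s := s + 1) (b - 1) (by omega)
        refine ⟨h5.1, ?_⟩
        rw [cntO_split l (by omega : s ≤ s + 1) hr, cntO_single, if_pos h2, h5.2]
        omega
    · simp only [if_neg h2] at h ⊢
      have h5 : oddP l (reach l N (s + 1) b) = true ∧
          cntO l (s + 1) (reach l N (s + 1) b) = b :=
        ih (N - (s + 1)) (by omega) (by omega) h
      have hr := le_reach l (N := N) (s := s + 1) b (by omega)
      refine ⟨h5.1, ?_⟩
      rw [cntO_split l (by omega : s ≤ s + 1) hr, cntO_single, if_neg h2, h5.2]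
      omega
  · simp only [dif_neg h1] at h
    omega

theorem le_reach_of_cnt (l : List Int) {N s t b : Nat} (h1 : s ≤ t) (h2 : t ≤ N)
    (h3 : cntO l s t ≤ b) : t ≤ reach l N s b := by
  by_contra hc
  push_neg at hc
  have hlt : reach l N s b < N := by omega
  obtain ⟨ho, hcnt⟩ := reach_lt_spec l hlt
  have hsr := le_reach l (N := N) (s := s) b (by omega)
  have hsp := cntO_split l (a := s) (b := reach l N s b) (c := t) hsr (le_of_lt hc)
  have hsp2 := cntO_split l (by omega : reach l N s b ≤ reach l N s b + 1) (by omega : reach l N s b + 1 ≤ t)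
  rw [cntO_single, if_pos ho] at hsp2
  omega

theorem reach_le_of (l : List Int) {N s t b : Nat} (h1 : s ≤ t) (h2 : t < N)
    (h3 : oddP l t = true) (h4 : cntO l s t = b) : reach l N s b ≤ t := by
  by_contra hc
  push_neg at hc
  have hcnt := reach_cnt l (N := N) (s := s) b (by omega)
  have hsp := cntO_split l (by omega : s ≤ t + 1) (by omega : t + 1 ≤ reach l N s b)
  have hsp2 := cntO_split l h1 (by omega : t ≤ t + 1)
  rw [cntO_single, if_pos h3] at hsp2
  omega

theorem reach_shift (l : List Int) {N f s K : Nat} (h1 : f ≤ s) (h2 : s ≤ N)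
    (h3 : s ≤ reach l N f K) (h4 : cntO l f s ≤ K) :
    reach l N s (K - cntO l f s) = reach l N f K := by
  have hfN : f ≤ N := by omega
  have hrKle := reach_le l N f K
  have hcK := reach_cnt l (N := N) (s := f) K hfN
  have hspK := cntO_split l h3 hrKle
  have hsp := cntO_split l h1 h3
  apply le_antisymm
  · -- reach s (K - cntO f s) ≤ reach f K
    by_cases hlt : reach l N f K < N
    · obtain ⟨ho, hc⟩ := reach_lt_spec l hlt
      exact reach_le_of l h3 hlt ho (by omega)
    · have : reach l N f K = N := by omega
      rw [this]
      exact reach_le l N s _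
  · -- reach f K ≤ reach s (K - cntO f s)
    exact le_reach_of_cnt l h3 hrKle (by omega)

-- firstEven lemmas
theorem firstEven_le (l : List Int) (N s : Nat) : firstEven l N s ≤ N := by
  fun_induction firstEven l N s <;> omega

theorem firstEven_all_odd (l : List Int) (N : Nat) {s j : Nat} (h1 : s ≤ j)
    (h2 : j < firstEven l N s) : oddP l j = true := by
  revert h1 h2
  induction hn : N - s using Nat.strong_induction_on generalizing s with
  | _ n ih =>
  intro h1 h2
  rw [firstEven] at h2
  by_cases hs : s < N
  · simp only [dif_pos hs] at h2
    by_cases ho : oddP l s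
    · simp only [if_pos ho] at h2
      by_cases hj : j = s
      · subst hj
        exact ho
      · exact ih (N - (s + 1)) (by omega) (by omega) (by omega) h2
    · simp only [if_neg ho] at h2
      omega
  · simp only [dif_neg hs] at h2
    omega

-- nthO / mO lemmas
theorem nth_eq_N_of_ge (l : List Int) {N j : Nat} (h : mO l N ≤ j) : nthO l N j = N := by
  have h1 := reach_le l N 0 j
  have h2 : N ≤ reach l N 0 j := le_reach_of_cnt l (Nat.zero_le N) (le_refl N) (by unfold mO at h; omega)
  unfold nthO
  omega

theorem nth_spec (l : List Int) {N j : Nat} (h : j < mO l N) :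
    nthO l N j < N ∧ oddP l (nthO l N j) = true ∧ cntO l 0 (nthO l N j) = j := by
  have hlt : nthO l N j < N := by
    by_contra hc
    have h1 := reach_le l N 0 j
    have h2 : reach l N 0 j = N := by unfold nthO at hc; omega
    have h3 := reach_cnt l (N := N) (s := 0) j (Nat.zero_le N)
    rw [h2] at h3
    unfold mO at h
    omega
  obtain ⟨h1, h2⟩ := reach_lt_spec l (b := j) hlt
  exact ⟨hlt, h1, h2⟩

theorem nth_mono (l : List Int) {N j j' : Nat} (h : j ≤ j') : nthO l N j ≤ nthO l N j' :=
  reach_mono_b l h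

theorem nth_lt_nth (l : List Int) {N a b : Nat} (ha : a < mO l N) (h : a < b) :
    nthO l N a < nthO l N b := by
  obtain ⟨h1, h2, h3⟩ := nth_spec l ha
  have h4 : cntO l 0 (nthO l N a + 1) = a + 1 := by
    rw [cntO_split l (Nat.zero_le _) (by omega : nthO l N a ≤ nthO l N a + 1), cntO_single, if_pos h2, h3]
  have h5 : nthO l N a + 1 ≤ reach l N 0 b :=
    le_reach_of_cnt l (Nat.zero_le _) (by omega) (by omega)
  have h6 : reach l N 0 b = nthO l N b := rfl
  omega

theorem cntO_st (l : List Int) {N c : Nat} (h : c ≤ mO l N) : cntO l 0 (stO l N c) = c := by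
  unfold stO
  by_cases hc : c = 0
  · simp [hc, cntO_nil l (le_refl 0)]
  · simp only [if_neg hc]
    obtain ⟨h1, h2, h3⟩ := nth_spec l (N := N) (j := c - 1) (by omega)
    rw [cntO_split l (Nat.zero_le _) (by omega : nthO l N (c-1) ≤ nthO l N (c-1) + 1), cntO_single, if_pos h2, h3]
    omega

theorem stO_le_N (l : List Int) {N c : Nat} (h : c ≤ mO l N) : stO l N c ≤ N := by
  unfold stO
  by_cases hc : c = 0
  · simp [hc]
  · simp only [if_neg hc]
    obtain ⟨h1, _, _⟩ := nth_spec l (N := N) (j := c - 1) (by omega)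
    omega

theorem st_le_nth (l : List Int) {N c j : Nat} (h1 : c ≤ mO l N) (h2 : c ≤ j) :
    stO l N c ≤ nthO l N j := by
  unfold stO
  by_cases hc : c = 0
  · simp [hc]
  · simp only [if_neg hc]
    rcases Nat.lt_or_ge j (mO l N) with hj | hj
    · have := nth_lt_nth l (N := N) (a := c - 1) (b := j) (by omega) (by omega)
      omega
    · rw [nth_eq_N_of_ge l hj]
      obtain ⟨hx, _, _⟩ := nth_spec l (N := N) (j := c - 1) (by omega)
      omega

theorem reach_st (l : List Int) {N c : Nat} (b : Nat) (h : c ≤ mO l N) :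
    reach l N (stO l N c) b = nthO l N (c + b) := by
  have h1 := cntO_st l h
  have h2 := stO_le_N l h
  have h3 : stO l N c ≤ reach l N 0 (c + b) := st_le_nth l h (by omega)
  have h4 := reach_shift l (N := N) (f := 0) (s := stO l N c) (K := c + b) (Nat.zero_le _) h2 h3 (by omega)
  rw [h1] at h4
  have h5 : c + b - c = b := by omega
  rw [h5] at h4
  exact h4

-- parity bridge
theorem mod_two_cases (x : Int) : PySem.Int.mod x 2 = 0 ∨ PySem.Int.mod x 2 = 1 :=
  PySem.Int.mod_two_eq x

theorem oddP_true_iff (l : List Int) (i : Nat) :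
    oddP l i = true ↔ PySem.Int.mod (l.getD i 0) 2 = 1 := by
  unfold oddP
  rcases mod_two_cases (l.getD i 0) with h | h <;> simp [h]

theorem oddP_false_iff (l : List Int) (i : Nat) :
    oddP l i = false ↔ PySem.Int.mod (l.getD i 0) 2 = 0 := by
  unfold oddP
  rcases mod_two_cases (l.getD i 0) with h | h <;> simp [h]

-- A-side bridge lemmas
theorem skipA_eq (l : List Int) {N s : Nat} (h : s ≤ N) :
    skipA l (N : Int) (s : Int) = ((firstEven l N s : Nat) : Int) := by
  revert h
  induction hn : N - s using Nat.strong_induction_on generalizing s with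
  | _ n ih =>
  intro h
  rw [skipA, firstEven]
  by_cases h1 : s < N
  · by_cases h2 : oddP l s
    · have hm : PySem.Int.mod (l.getD s 0) 2 = 1 := (oddP_true_iff l s).mp h2
      have hcond : ((s : Int) < (N : Int) ∧ PySem.Int.mod (PySem.List.pyGetD l (s : Int) 0) 2 ≠ 0) := by
        rw [PySem.List.pyGetD_natCast]
        exact ⟨by omega, by omega⟩
      rw [dif_pos hcond, dif_pos h1, if_pos h2]
      rw [show ((s : Int) + 1) = ((s + 1 : Nat) : Int) by push_cast; ring]
      exact ih (N - (s + 1)) (by omega) (by omega) (by omega)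
    · have hm : PySem.Int.mod (l.getD s 0) 2 = 0 := (oddP_false_iff l s).mp (by simpa using h2)
      have hcond : ¬ ((s : Int) < (N : Int) ∧ PySem.Int.mod (PySem.List.pyGetD l (s : Int) 0) 2 ≠ 0) := by
        rw [PySem.List.pyGetD_natCast]
        omega
      rw [dif_neg hcond, dif_pos h1, if_neg h2]
  · have hcond : ¬ ((s : Int) < (N : Int) ∧ PySem.Int.mod (PySem.List.pyGetD l (s : Int) 0) 2 ≠ 0) := by
      omega
    rw [dif_neg hcond, dif_neg h1]
    omega

theorem shrink (l : List Int) {N f q s : Nat} (temp ans : Int)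
    (hfq : f ≤ q) (hqs : q ≤ s) (hsN : s < N)
    (hev : ∀ j, f ≤ j → j < q → oddP l j = false)
    (hq : oddP l q = true) (hs : oddP l s = true) :
    loopA l (N : Int) (f : Int) (s : Int) temp 0 ans
      = loopA l (N : Int) ((q + 1 : Nat) : Int) ((s + 1 : Nat) : Int)
          (temp - ((q - f : Nat) : Int)) 0 (max ans temp) := by
  revert hfq hev
  induction hd : q - f using Nat.strong_induction_on generalizing f temp ans with
  | _ d ih =>
  intro hfq hev
  have hmods : PySem.Int.mod (PySem.List.pyGetD l (s : Int) 0) 2 = 1 := by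
    rw [PySem.List.pyGetD_natCast]
    exact (oddP_true_iff l s).mp hs
  rw [loopA]
  rw [dif_pos (⟨by omega, by omega⟩ : ((f : Int) < (N : Int) ∧ (s : Int) < (N : Int)))]
  rw [hmods]
  rw [if_neg (by norm_num), if_pos rfl]
  by_cases hfq2 : f = q
  · have hmodf : PySem.Int.mod (PySem.List.pyGetD l (f : Int) 0) 2 = 1 := by
      rw [PySem.List.pyGetD_natCast, hfq2]
      exact (oddP_true_iff l q).mp hq
    rw [hmodf]
    rw [loopA]
    by_cases h2 : f + 1 < N
    · rw [dif_pos (⟨by omega, by omega⟩ : ((f : Int) + 1 < (N : Int) ∧ (s : Int) < (N : Int)))]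
      rw [hmods]
      rw [if_neg (by norm_num), if_neg (by norm_num)]
      rw [show ((f : Int) + 1) = ((q + 1 : Nat) : Int) by omega]
      rw [show ((s : Int) + 1) = ((s + 1 : Nat) : Int) by omega]
      rw [show (temp - (1 - 1) : Int) = temp - ((d : Nat) : Int) by omega]
      rw [show ((0 : Int) + 1 - 1) = 0 by norm_num]
    · rw [dif_neg (show ¬((f : Int) + 1 < (N : Int) ∧ (s : Int) < (N : Int)) by omega)]
      conv_rhs => rw [loopA]
      rw [dif_neg (show ¬(((q + 1 : Nat) : Int) < (N : Int) ∧ ((s + 1 : Nat) : Int) < (N : Int)) by omega)]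
      congr 1
      omega
  · have hfe : oddP l f = false := hev f (le_refl f) (by omega)
    have hmodf : PySem.Int.mod (PySem.List.pyGetD l (f : Int) 0) 2 = 0 := by
      rw [PySem.List.pyGetD_natCast]
      exact (oddP_false_iff l f).mp hfe
    rw [hmodf]
    rw [show ((f : Int) + 1) = ((f + 1 : Nat) : Int) by push_cast; ring]
    rw [show (temp - (1 - 0) : Int) = temp - 1 by ring]
    rw [show ((0 : Int) + 0) = 0 by norm_num]
    have hev2 : ∀ j, f + 1 ≤ j → j < q → oddP l j = false := fun j hj1 hj2 => hev j (by omega) hj2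
    have hrec := ih (q - (f + 1)) (by omega) (f := f + 1) (temp - 1) (max ans temp) (by omega) (by omega) hev2
    rw [hrec]
    rw [show (temp - 1 - ((q - (f + 1) : Nat) : Int)) = temp - ((q - f : Nat) : Int) by omega]
    rw [max_assoc, max_eq_left (by omega : temp - 1 ≤ temp)]
    rw [show ((q - f : Nat) : Int) = ((d : Nat) : Int) by omega]

theorem expand (l : List Int) {N f s : Nat} (b : Nat) (temp ans : Int)
    (hf : f < N) (hs : s ≤ N) :
    loopA l (N : Int) (f : Int) (s : Int) temp (b : Int) ans
      = if reach l N s b < N then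
          loopA l (N : Int) (f : Int) ((reach l N s b : Nat) : Int)
            (temp + ((cntE l s (reach l N s b) : Nat) : Int)) 0 ans
        else max ans (temp + ((cntE l s (reach l N s b) : Nat) : Int)) := by
  revert hs
  induction hn : N - s using Nat.strong_induction_on generalizing s b temp with
  | _ n ih =>
  intro hs
  by_cases h1 : s < N
  · by_cases h2 : oddP l s
    · by_cases h3 : b = 0
      · subst h3
        have hre : reach l N s 0 = s := by rw [reach]; simp [h1, h2]
        rw [hre, if_pos h1, cntE_nil l (le_refl s)]
        norm_num
      · have hre : reach l N s b = reach l N (s + 1) (b - 1) := by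
          rw [reach]; simp [h1, h2, h3]
        have hle1 : (s + 1 : Nat) ≤ N := by omega
        have hr1 := le_reach l (N := N) (s := s + 1) (b - 1) hle1
        have hcE : cntE l s (reach l N (s + 1) (b - 1)) = cntE l (s + 1) (reach l N (s + 1) (b - 1)) := by
          rw [cntE_split l (by omega : s ≤ s + 1) hr1, cntE_single, if_pos h2]
          omega
        rw [hre, hcE]
        rw [loopA]
        rw [dif_pos (⟨by omega, by omega⟩ : ((f : Int) < (N : Int) ∧ (s : Int) < (N : Int)))]
        have hmods : PySem.Int.mod (PySem.List.pyGetD l (s : Int) 0) 2 = 1 := by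
          rw [PySem.List.pyGetD_natCast]
          exact (oddP_true_iff l s).mp h2
        rw [hmods]
        rw [if_neg (by norm_num), if_neg (show ¬((b : Int) = 0) by omega)]
        rw [show ((s : Int) + 1) = ((s + 1 : Nat) : Int) by push_cast; ring,
            show ((b : Int) - 1) = ((b - 1 : Nat) : Int) by omega]
        exact ih (N - (s + 1)) (by omega) (b - 1) temp (by omega) hle1
    · have hre : reach l N s b = reach l N (s + 1) b := by
        rw [reach]; simp [h1, h2]
      have hle1 : (s + 1 : Nat) ≤ N := by omega
      have hr1 := le_reach l (N := N) (s := s + 1) b hle1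
      have hcE : cntE l s (reach l N (s + 1) b) = 1 + cntE l (s + 1) (reach l N (s + 1) b) := by
        rw [cntE_split l (by omega : s ≤ s + 1) hr1, cntE_single, if_neg h2]
      rw [hre]
      rw [loopA]
      rw [dif_pos (⟨by omega, by omega⟩ : ((f : Int) < (N : Int) ∧ (s : Int) < (N : Int)))]
      have hmods : PySem.Int.mod (PySem.List.pyGetD l (s : Int) 0) 2 = 0 := by
        rw [PySem.List.pyGetD_natCast]
        exact (oddP_false_iff l s).mp (by simpa using h2)
      rw [hmods, if_pos rfl]
      rw [show ((s : Int) + 1) = ((s + 1 : Nat) : Int) by push_cast; ring]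
      rw [ih (N - (s + 1)) (by omega) b (temp + 1) (by omega) hle1]
      rw [hcE]
      have harith : temp + 1 + ((cntE l (s + 1) (reach l N (s + 1) b) : Nat) : Int)
          = temp + ((1 + cntE l (s + 1) (reach l N (s + 1) b) : Nat) : Int) := by push_cast; ring
      rw [harith]
  · have hre : reach l N s b = N := reach_eq_of_ge l b (by omega)
    rw [hre, if_neg (lt_irrefl N)]
    rw [cntE_nil l (by omega : N ≤ s)]
    rw [loopA]
    rw [dif_neg (show ¬((f : Int) < (N : Int) ∧ (s : Int) < (N : Int)) by omega)]
    norm_num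

-- best window value over windows starting at f, firstOdd f + 1, ...
def bestA (l : List Int) (N K f : Nat) : Int :=
  if h : reach l N f K < N then
    max ((cntE l f (reach l N f K) : Nat) : Int) (bestA l N K (reach l N f 0 + 1))
  else ((cntE l f N : Nat) : Int)
termination_by N - f
decreasing_by
  have h0 : f < N := by
    by_contra h0
    have := reach_eq_of_ge (l := l) (N := N) (s := f) K (by omega)
    omega
  have h1 : f ≤ reach l N f 0 := le_reach l 0 (Nat.le_of_lt h0)
  have h2 : reach l N f 0 ≤ reach l N f K := reach_mono_b l (Nat.zero_le K)
  omega

theorem main_loop (l : List Int) {N K : Nat} :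
    ∀ f s b (temp ans : Int), f ≤ s → s ≤ N → s ≤ reach l N f K → cntO l f s + b = K →
      temp = ((cntE l f s : Nat) : Int) →
      loopA l (N : Int) (f : Int) (s : Int) temp (b : Int) ans = max ans (bestA l N K f) := by
  intro f s b temp ans
  induction hn : N - f using Nat.strong_induction_on generalizing f s b temp ans with
  | _ n ih =>
  intro h1 h2 h3 h4 h5
  by_cases hfN : f < N
  · have hrs := reach_shift l (N := N) (f := f) (s := s) (K := K) h1 h2 h3 (by omega)
    have hbb : K - cntO l f s = b := by omega
    rw [hbb] at hrs
    rw [expand l b temp ans hfN h2, hrs]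
    by_cases hlt : reach l N f K < N
    · rw [if_pos hlt]
      obtain ⟨hoE, hcE⟩ := reach_lt_spec l hlt
      have hq1 : f ≤ reach l N f 0 := le_reach l 0 (by omega)
      have hq2 : reach l N f 0 ≤ reach l N f K := reach_mono_b l (Nat.zero_le K)
      have hqN : reach l N f 0 < N := by omega
      obtain ⟨hoq, hcq⟩ := reach_lt_spec l hqN
      have hevq : ∀ j, f ≤ j → j < reach l N f 0 → oddP l j = false :=
        fun j hj1 hj2 => cntO_zero_pointwise l hcq hj1 hj2
      have hce : cntE l f (reach l N f K) = cntE l f s + cntE l s (reach l N f K) :=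
        cntE_split l h1 h3
      have htemp : temp + ((cntE l s (reach l N f K) : Nat) : Int)
          = ((cntE l f (reach l N f K) : Nat) : Int) := by
        rw [h5, hce]; push_cast; ring
      rw [htemp]
      rw [shrink l (((cntE l f (reach l N f K) : Nat)) : Int) ans hq1 hq2 hlt hevq hoq hoE]
      -- abbreviations
      have hcfq : cntE l f (reach l N f 0) = reach l N f 0 - f := by
        have := cnt_len l (show f ≤ reach l N f 0 by omega)
        omega
      have hsp1 : cntE l f (reach l N f K)
          = cntE l f (reach l N f 0) + cntE l (reach l N f 0) (reach l N f K) :=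
        cntE_split l hq1 hq2
      have hsp2 : cntE l (reach l N f 0) (reach l N f K + 1)
          = cntE l (reach l N f 0) (reach l N f 0 + 1) + cntE l (reach l N f 0 + 1) (reach l N f K + 1) :=
        cntE_split l (by omega) (by omega)
      have hsp3 : cntE l (reach l N f 0) (reach l N f K + 1)
          = cntE l (reach l N f 0) (reach l N f K) + cntE l (reach l N f K) (reach l N f K + 1) :=
        cntE_split l (by omega) (by omega)
      have hq_single : cntE l (reach l N f 0) (reach l N f 0 + 1) = 0 := by
        rw [cntE_single, if_pos hoq]
      have he_single : cntE l (reach l N f K) (reach l N f K + 1) = 0 := by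
        rw [cntE_single, if_pos hoE]
      have harg : (((cntE l f (reach l N f K) : Nat)) : Int) - ((reach l N f 0 - f : Nat) : Int)
          = ((cntE l (reach l N f 0 + 1) (reach l N f K + 1) : Nat) : Int) := by
        omega
      rw [harg]
      -- odd counts for the new window
      have hosp1 : cntO l f (reach l N f K + 1)
          = cntO l f (reach l N f K) + cntO l (reach l N f K) (reach l N f K + 1) :=
        cntO_split l (by omega) (by omega)
      have hosp2 : cntO l f (reach l N f K + 1)
          = cntO l f (reach l N f 0) + cntO l (reach l N f 0) (reach l N f 0 + 1)
            + cntO l (reach l N f 0 + 1) (reach l N f K + 1) := by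
        rw [cntO_split l (show f ≤ reach l N f 0 + 1 by omega) (show reach l N f 0 + 1 ≤ reach l N f K + 1 by omega),
            cntO_split l (show f ≤ reach l N f 0 by omega) (show reach l N f 0 ≤ reach l N f 0 + 1 by omega)]
      have hoq_single : cntO l (reach l N f 0) (reach l N f 0 + 1) = 1 := by
        rw [cntO_single, if_pos hoq]
      have hoe_single : cntO l (reach l N f K) (reach l N f K + 1) = 1 := by
        rw [cntO_single, if_pos hoE]
      have hco : cntO l (reach l N f 0 + 1) (reach l N f K + 1) + 0 = K := by omega
      have hreK : reach l N f K + 1 ≤ reach l N (reach l N f 0 + 1) K :=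
        le_reach_of_cnt l (by omega) (by omega) (by omega)
      have hIH := ih (N - (reach l N f 0 + 1)) (by omega) (reach l N f 0 + 1) (reach l N f K + 1)
        0 (((cntE l (reach l N f 0 + 1) (reach l N f K + 1) : Nat)) : Int)
        (max ans (((cntE l f (reach l N f K) : Nat)) : Int)) (by omega) (by omega)
        (by omega) hreK hco rfl
      rw [show ((0 : Nat) : Int) = (0 : Int) by norm_num] at hIH
      rw [hIH]
      conv_rhs => rw [bestA]
      rw [dif_pos hlt]
      exact max_assoc ans _ _
    · rw [if_neg hlt]
      have heN : reach l N f K = N := by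
        have := reach_le l N f K
        omega
      rw [heN]
      conv_rhs => rw [bestA]
      rw [dif_neg hlt]
      have hfin : temp + ((cntE l s N : Nat) : Int) = ((cntE l f N : Nat) : Int) := by
        rw [h5, cntE_split l h1 h2]
        push_cast
        ring
      rw [hfin]
  · -- f = N (and hence s = N)
    have hreN : reach l N f K = N := reach_eq_of_ge l K (by omega)
    rw [loopA]
    rw [dif_neg (show ¬(((f : Nat) : Int) < (N : Int) ∧ ((s : Nat) : Int) < (N : Int)) by omega)]
    rw [bestA]
    rw [dif_neg (show ¬(reach l N f K < N) by omega)]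
    have e1 : cntE l f s = 0 := cntE_nil l (by omega)
    have e2 : cntE l f N = 0 := cntE_nil l (by omega)
    rw [h5, e1, e2]

-- B-side bridge lemmas
theorem O_getD (l : List Int) (N : Nat) :
    ∀ s j, s ≤ N → (((List.range' s (N - s)).filter (fun i => oddP l i)).getD j N) = reach l N s j := by
  intro s
  induction hn : N - s using Nat.strong_induction_on generalizing s with
  | _ n ih =>
  intro j h
  by_cases h1 : s < N
  · rw [show n = (N - (s + 1)) + 1 by omega, List.range'_succ]
    by_cases h2 : oddP l s
    · rw [List.filter_cons_of_pos h2]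
      conv_rhs => rw [reach]
      cases j with
      | zero =>
        rw [List.getD_cons_zero, dif_pos h1, if_pos h2, if_pos rfl]
      | succ j' =>
        rw [List.getD_cons_succ, dif_pos h1, if_pos h2, if_neg (by omega : ¬(j' + 1 = 0)),
            Nat.add_sub_cancel]
        exact ih (N - (s + 1)) (by omega) (s + 1) (by omega) j' (by omega)
    · rw [List.filter_cons_of_neg (by simpa using h2)]
      conv_rhs => rw [reach]
      rw [dif_pos h1, if_neg (by simpa using h2)]
      exact ih (N - (s + 1)) (by omega) (s + 1) (by omega) j (by omega)
  · rw [show n = 0 by omega]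
    rw [reach_eq_of_ge l j (by omega)]
    simp

theorem O_getD0 (l : List Int) (N j : Nat) :
    (((List.range N).filter (fun i => oddP l i)).getD j N) = nthO l N j := by
  have h := O_getD l N 0 j (Nat.zero_le N)
  rw [List.range_eq_range']
  simpa using h

theorem O_len (l : List Int) (N : Nat) :
    ((List.range N).filter (fun i => oddP l i)).length = mO l N := by
  rw [← List.countP_eq_length_filter]
  unfold mO cntO
  rw [List.range_eq_range', Nat.sub_zero]

theorem ext_getD (l : List Int) (N : Nat) (i : Nat) (hi : i ≤ mO l N + 1) :
    PySem.List.pyGetD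
      ([(-1 : Int)] ++ (((List.range N).filter (fun x => oddP l x)).map (fun j : Nat => (j : Int))) ++ [(N : Int)])
      ((i : Nat) : Int) 0
      = if i = 0 then (-1 : Int) else ((nthO l N (i - 1) : Nat) : Int) := by
  rw [PySem.List.pyGetD_natCast]
  have hlen : (((List.range N).filter (fun x => oddP l x)).map (fun j : Nat => (j : Int))).length = mO l N := by
    rw [List.length_map, O_len]
  cases i with
  | zero => simp
  | succ i' =>
    rw [if_neg (by omega : ¬(i' + 1 = 0)), Nat.add_sub_cancel]
    rw [List.append_assoc, List.singleton_append, List.getD_cons_succ]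
    rcases Nat.lt_or_ge i' (mO l N) with hlt | hge
    · have hb : i' < (((List.range N).filter (fun x => oddP l x)).map (fun j : Nat => (j : Int))).length := by
        rw [hlen]; exact hlt
      rw [List.getD_append _ _ _ _ hb]
      rw [List.getD_eq_getElem _ _ hb]
      rw [List.getElem_map]
      have hb2 : i' < ((List.range N).filter (fun x => oddP l x)).length := by
        rw [List.length_map] at hb; exact hb
      have hOg : ((List.range N).filter (fun x => oddP l x))[i']'hb2
          = ((List.range N).filter (fun x => oddP l x)).getD i' N :=
        (List.getD_eq_getElem _ N hb2).symm
      rw [hOg, O_getD0]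
    · have hieq : i' = mO l N := by omega
      rw [List.getD_append_right _ _ _ _ (by rw [hlen]; omega)]
      rw [hlen, hieq, Nat.sub_self, List.getD_cons_zero]
      rw [nth_eq_N_of_ge l (le_refl _)]

theorem fI_eval (l : List Int) (N K : Nat) (i : Nat) (hi : i ≤ mO l N) :
    ((nthO l N (min (i + K) (mO l N)) : Nat) : Int)
      - (if i = 0 then (-1 : Int) else ((nthO l N (i - 1) : Nat) : Int)) - 1
      - (((min (i + K) (mO l N) : Nat) : Int) - ((i : Nat) : Int))
    = fI l N K i := by
  have hjm : min (i + K) (mO l N) ≤ mO l N := by omega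
  have hij : i ≤ min (i + K) (mO l N) := by omega
  have hcj : cntO l 0 (nthO l N (min (i + K) (mO l N))) = min (i + K) (mO l N) := by
    rcases Nat.lt_or_ge (min (i + K) (mO l N)) (mO l N) with hlt | hge
    · exact (nth_spec l hlt).2.2
    · rw [show min (i + K) (mO l N) = mO l N by omega, nth_eq_N_of_ge l (le_refl _)]
      rfl
  by_cases hi0 : i = 0
  · subst hi0
    rw [if_pos rfl]
    unfold fI stO
    rw [if_pos rfl]
    have hlen := cnt_len l (Nat.zero_le (nthO l N (min (0 + K) (mO l N))))
    omega
  · rw [if_neg hi0]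
    unfold fI stO
    rw [if_neg hi0]
    have hstle : nthO l N (i - 1) + 1 ≤ nthO l N (min (i + K) (mO l N)) := by
      have := nth_lt_nth l (N := N) (a := i - 1) (b := min (i + K) (mO l N)) (by omega) (by omega)
      omega
    have hco_st : cntO l 0 (nthO l N (i - 1) + 1) = i := by
      obtain ⟨h1, h2, h3⟩ := nth_spec l (N := N) (j := i - 1) (by omega)
      rw [cntO_split l (Nat.zero_le _) (show nthO l N (i - 1) ≤ nthO l N (i - 1) + 1 by omega),
          cntO_single, if_pos h2, h3]
      omega
    have hsplit := cntO_split l (Nat.zero_le (nthO l N (i - 1) + 1)) hstle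
    have hlen := cnt_len l hstle
    omega

theorem B_eval (l : List Int) (N K : Nat) :
    solution_alt l (N : Int) (K : Int)
      = (List.range (mO l N + 1)).foldl (fun acc c => max acc (fI l N K c)) 0 := by
  have hfil : (List.range N).filter
      ((fun i => PySem.Int.mod (PySem.List.pyGetD l i 0) 2 != 0) ∘ (fun k : Nat => (k : Int)))
      = (List.range N).filter (fun i => oddP l i) := by
    apply List.filter_congr
    intro x _
    simp only [Function.comp_apply, PySem.List.pyGetD_natCast]
    rfl
  simp only [solution_alt]
  rw [PySem.List.pyRange_zero_natCast, List.filter_map, hfil]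
  rw [List.length_map, O_len]
  rw [show ((mO l N : Int) + 1) = ((mO l N + 1 : Nat) : Int) by push_cast; ring]
  rw [PySem.List.pyRange_zero_natCast, List.foldl_map]
  apply PySem.List.foldl_congr_mem
  intro acc x hx
  rw [List.mem_range] at hx
  have hx1 : x ≤ mO l N := by omega
  rw [show ((x : Int) + (K : Int)) = ((x + K : Nat) : Int) by push_cast; ring]
  rw [← Nat.cast_min]
  rw [show ((min (x + K) (mO l N) : Nat) : Int) + 1 = ((min (x + K) (mO l N) + 1 : Nat) : Int) by push_cast; ring]
  rw [ext_getD l N (min (x + K) (mO l N) + 1) (by omega), ext_getD l N x (by omega)]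
  rw [if_neg (by omega : ¬(min (x + K) (mO l N) + 1 = 0)), Nat.add_sub_cancel]
  rw [fI_eval l N K x hx1]
  by_cases h : acc < fI l N K x
  · rw [if_pos h, max_eq_right (le_of_lt h)]
  · rw [if_neg h, max_eq_left (by omega)]

theorem le_foldr_max_of_mem (g : Nat → Int) {L : List Nat} {x : Nat} (h : x ∈ L) :
    g x ≤ (L.map g).foldr max 0 := by
  induction L with
  | nil => simp at h
  | cons y ys ih =>
    rcases List.mem_cons.mp h with h1 | h1
    · subst h1
      exact le_max_left _ _
    · exact le_trans (ih h1) (le_max_right _ _)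

theorem foldr_max_le (g : Nat → Int) {L : List Nat} {X : Int}
    (h : ∀ x ∈ L, g x ≤ X) (h0 : 0 ≤ X) : (L.map g).foldr max 0 ≤ X := by
  induction L with
  | nil => simpa using h0
  | cons y ys ih =>
    simp only [List.map_cons, List.foldr_cons]
    exact max_le (h y (by simp)) (ih (fun x hx => h x (by simp [hx])))

theorem foldl_max_eq (g : Nat → Int) (hg : ∀ c, 0 ≤ g c) :
    ∀ (L : List Nat) (a : Int), 0 ≤ a →
      L.foldl (fun acc c => max acc (g c)) a = max a ((L.map g).foldr max 0) := by
  intro L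
  induction L with
  | nil =>
    intro a ha
    simp [max_eq_left ha]
  | cons x xs ih =>
    intro a ha
    simp only [List.foldl_cons, List.map_cons, List.foldr_cons]
    rw [ih (max a (g x)) (le_trans (hg x) (le_max_right _ _))]
    rw [max_assoc]

theorem seg_cons (l : List Int) {N K c : Nat} (h : c ≤ mO l N) :
    segMax l N K c = max (fI l N K c) (segMax l N K (c + 1)) := by
  unfold segMax
  rw [show mO l N + 1 - c = (mO l N - c) + 1 by omega, List.range'_succ]
  rw [show mO l N + 1 - (c + 1) = mO l N - c by omega]
  rfl

theorem le_segMax (l : List Int) {N K c j : Nat} (h1 : c ≤ j) (h2 : j ≤ mO l N) :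
    fI l N K j ≤ segMax l N K c := by
  unfold segMax
  apply le_foldr_max_of_mem
  rw [List.mem_range'_1]
  omega

theorem stO_mono (l : List Int) {N c j : Nat} (h : c ≤ j) : stO l N c ≤ stO l N j := by
  unfold stO
  by_cases hc : c = 0
  · simp [hc]
  · rw [if_neg hc, if_neg (by omega : ¬(j = 0))]
    have := nth_mono l (N := N) (show c - 1 ≤ j - 1 by omega)
    omega

theorem bestA_eq_seg (l : List Int) {N K : Nat} :
    ∀ c, c ≤ mO l N → bestA l N K (stO l N c) = segMax l N K c := by
  intro c
  induction hn : mO l N - c using Nat.strong_induction_on generalizing c with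
  | _ n ih =>
  intro hc
  rw [bestA, seg_cons l hc]
  have hreK : reach l N (stO l N c) K = nthO l N (c + K) := reach_st l K hc
  have hre0 : reach l N (stO l N c) 0 = nthO l N c := by
    have := reach_st l 0 hc
    rwa [Nat.add_zero] at this
  by_cases hck : c + K < mO l N
  · have hlt : reach l N (stO l N c) K < N := by
      rw [hreK]
      exact (nth_spec l hck).1
    rw [dif_pos hlt]
    have hst1 : nthO l N c + 1 = stO l N (c + 1) := by
      unfold stO
      simp
    rw [hreK, hre0, hst1]
    rw [ih (mO l N - (c + 1)) (by omega) (c + 1) (by omega) (by omega)]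
    unfold fI
    rw [show min (c + K) (mO l N) = c + K by omega]
  · have hN : nthO l N (c + K) = N := nth_eq_N_of_ge l (by omega)
    have hnlt : ¬(reach l N (stO l N c) K < N) := by
      rw [hreK, hN]
      omega
    rw [dif_neg hnlt]
    have hfIc : fI l N K c = ((cntE l (stO l N c) N : Nat) : Int) := by
      unfold fI
      rw [show min (c + K) (mO l N) = mO l N by omega, nth_eq_N_of_ge l (le_refl _)]
    have hseg : segMax l N K (c + 1) ≤ fI l N K c := by
      unfold segMax
      apply foldr_max_le
      · intro x hx
        rw [List.mem_range'_1] at hx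
        have hxm : min (x + K) (mO l N) = mO l N := by omega
        rw [hfIc]
        unfold fI
        rw [hxm, nth_eq_N_of_ge l (le_refl _)]
        exact_mod_cast cntE_left_anti l (stO_mono l (by omega))
      · rw [hfIc]
        exact Int.natCast_nonneg _
    rw [max_eq_left hseg, hfIc]

theorem fe_all_odd_nth (l : List Int) {N j : Nat} (h : j < firstEven l N 0) :
    nthO l N j = j := by
  have hoj : oddP l j = true := firstEven_all_odd l N (Nat.zero_le j) h
  have hjN : j < N := lt_of_lt_of_le h (firstEven_le l N 0)
  have hcnt : cntO l 0 j = j := by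
    rw [cntO_all l (fun x hx1 hx2 => firstEven_all_odd l N (Nat.zero_le x) (by omega))]
    omega
  exact le_antisymm (reach_le_of l (Nat.zero_le j) hjN hoj hcnt)
    (le_reach_of_cnt l (Nat.zero_le j) (by omega) (by omega))

theorem fe_le_m (l : List Int) (N : Nat) : firstEven l N 0 ≤ mO l N := by
  have h1 : cntO l 0 (firstEven l N 0) = firstEven l N 0 := by
    rw [cntO_all l (fun x hx1 hx2 => firstEven_all_odd l N (Nat.zero_le x) hx2)]
    omega
  have h2 := cntO_split l (Nat.zero_le (firstEven l N 0)) (firstEven_le l N 0)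
  unfold mO
  omega

theorem cntE_right_mono' (l : List Int) {a b b' : Nat} (h : b ≤ b') :
    cntE l a b ≤ cntE l a b' := by
  rcases Nat.le_total a b with hab | hab
  · exact cntE_right_mono l hab h
  · rw [cntE_nil l hab]
    omega

theorem cntE_drop_odd (l : List Int) {a b : Nat} (h : oddP l a = true) :
    cntE l a b = cntE l (a + 1) b := by
  rcases Nat.lt_or_ge a b with hab | hab
  · rw [cntE_split l (show a ≤ a + 1 by omega) (show a + 1 ≤ b by omega), cntE_single, if_pos h]
    omega
  · rw [cntE_nil l (by omega), cntE_nil l (by omega)]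

theorem st_fe (l : List Int) (N : Nat) : stO l N (firstEven l N 0) = firstEven l N 0 := by
  unfold stO
  by_cases h : firstEven l N 0 = 0
  · simp [h]
  · rw [if_neg h, fe_all_odd_nth l (by omega)]
    omega

theorem fI_mono_lead (l : List Int) {N K i : Nat} (h : i < firstEven l N 0) :
    fI l N K i ≤ fI l N K (i + 1) := by
  have hfem := fe_le_m l N
  have hsti : stO l N i = i := by
    unfold stO
    by_cases hi : i = 0
    · simp [hi]
    · rw [if_neg hi, fe_all_odd_nth l (by omega)]
      omega
  have hsti1 : stO l N (i + 1) = i + 1 := by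
    unfold stO
    rw [if_neg (by omega : ¬(i + 1 = 0)), Nat.add_sub_cancel, fe_all_odd_nth l (by omega)]
  have hoi : oddP l i = true := firstEven_all_odd l N (Nat.zero_le i) h
  unfold fI
  rw [hsti, hsti1]
  rw [cntE_drop_odd l hoi]
  have hnle := nth_mono l (N := N) (show min (i + K) (mO l N) ≤ min (i + 1 + K) (mO l N) by omega)
  exact_mod_cast cntE_right_mono' l hnle

theorem seg_zero_eq_fe (l : List Int) (N K : Nat) :
    segMax l N K 0 = segMax l N K (firstEven l N 0) := by
  suffices h : ∀ d c, c ≤ firstEven l N 0 → firstEven l N 0 - c = d →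
      segMax l N K c = segMax l N K (firstEven l N 0) from
    h _ 0 (Nat.zero_le _) rfl
  intro d
  induction d with
  | zero =>
    intro c h1 h2
    rw [show c = firstEven l N 0 by omega]
  | succ d ihd =>
    intro c h1 h2
    have hcfe : c < firstEven l N 0 := by omega
    have hcm : c ≤ mO l N := le_trans (by omega) (fe_le_m l N)
    have hseg1 := ihd (c + 1) (by omega) (by omega)
    rw [seg_cons l hcm, hseg1]
    have hle : fI l N K c ≤ segMax l N K (firstEven l N 0) := by
      have h3 := fI_mono_lead l (K := K) hcfe
      have h4 : fI l N K (c + 1) ≤ segMax l N K (c + 1) :=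
        le_segMax l (le_refl (c + 1)) (le_trans (by omega : c + 1 ≤ firstEven l N 0) (fe_le_m l N))
      rw [hseg1] at h4
      exact le_trans h3 h4
    rw [max_eq_right hle]

theorem neg_case (l : List Int) (n k : Int) (hn : n < 0) (hk : 0 ≤ k) :
    solution l n k = solution_alt l n k := by
  unfold solution solution_alt
  rw [skipA, dif_neg (by omega : ¬((0 : Int) < n ∧ PySem.Int.mod (PySem.List.pyGetD l 0 0) 2 ≠ 0))]
  rw [loopA, dif_neg (by omega : ¬((0 : Int) < n ∧ (0 : Int) < n))]
  rw [PySem.List.pyRange_one_eq_nil (by omega : n ≤ 0)]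
  simp only [List.filter_nil, List.length_nil, List.nil_append, Nat.cast_zero, zero_add,
    List.singleton_append]
  rw [show PySem.List.pyRange 0 (1 : Int) 1 = [(0 : Int)] by decide]
  simp only [List.foldl_cons, List.foldl_nil]
  rw [min_eq_right (by omega : (0 : Int) ≤ 0 + k)]
  have hg1 : PySem.List.pyGetD [(-1 : Int), n] ((0 : Int) + 1) 0 = n := by
    rw [show ((0 : Int) + 1) = ((1 : Nat) : Int) by norm_num, PySem.List.pyGetD_natCast]
    rfl
  have hg0 : PySem.List.pyGetD [(-1 : Int), n] (0 : Int) 0 = -1 := by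
    rw [show (0 : Int) = ((0 : Nat) : Int) by norm_num, PySem.List.pyGetD_natCast]
    rfl
  rw [hg1, hg0]
  rw [if_neg (by omega : ¬((0 : Int) < n - -1 - 1 - (0 - 0)))]
  norm_num

-- ===== VERDICT (by name: the statement is the Claim_ definition above) =====
theorem solution_spec : Claim_equal_solution := by
  unfold Claim_equal_solution
  intro l n k _ hpre
  obtain ⟨hn_len, hk⟩ := hpre
  unfold Spec_solution
  obtain ⟨K, rfl⟩ : ∃ K : Nat, k = (K : Int) := ⟨k.toNat, by omega⟩
  rcases lt_or_ge n 0 with hneg | hpos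
  · exact neg_case l n (K : Int) hneg hk
  · obtain ⟨N, rfl⟩ : ∃ N : Nat, n = (N : Int) := ⟨n.toNat, by omega⟩
    unfold solution
    dsimp only
    have hskip : skipA l (N : Int) (0 : Int) = ((firstEven l N 0 : Nat) : Int) := by
      conv_lhs => rw [show (0 : Int) = ((0 : Nat) : Int) by norm_num]
      exact skipA_eq l (Nat.zero_le N)
    rw [hskip]
    have hfe_le := firstEven_le l N 0
    have hml := main_loop l (K := K) (firstEven l N 0) (firstEven l N 0) K 0 0 (le_refl _)
      hfe_le (le_reach l K hfe_le) (by rw [cntO_nil l (le_refl _)]; omega) (by rw [cntE_nil l (le_refl _)]; norm_num)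
    rw [hml]
    rw [B_eval l N K]
    rw [foldl_max_eq (fI l N K) (fun c => Int.natCast_nonneg _) (List.range (mO l N + 1)) 0 (le_refl 0)]
    have hseg0 : ((List.range (mO l N + 1)).map (fI l N K)).foldr max 0 = segMax l N K 0 := by
      unfold segMax
      rw [List.range_eq_range', Nat.sub_zero]
    rw [hseg0, seg_zero_eq_fe l N K]
    rw [← bestA_eq_seg l (firstEven l N 0) (fe_le_m l N), st_fe]
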